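-- pv_equiv track=rewrite | github.com/topatlant/AdventOfCode-python | y2022/day07.py | split_by_dollars
-- ===== SOURCE A (Python) =====
-- from typing import Iterator
--
-- def split_by_dollars(lines: list[str]) -> Iterator[tuple[str, list[str]]]:
--     acc = [lines[0]]
--     for line in lines[1:]:
--         if line.startswith("$"):
--             yield acc[0], acc[1:]
--             acc = []
--         acc.append(line)
--     yield acc[0], acc[1:]
-- ===== SOURCE B (Python) =====
-- from typing import Iterator
--
-- def split_by_dollars(lines: list[str]) -> Iterator[tuple[str, list[str]]]:
--     head = lines[0]
--     rest = lines[1:]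
--     while True:
--         k = 0
--         while k < len(rest) and not rest[k].startswith("$"):
--             k += 1
--         yield head, rest[:k]
--         if k == len(rest):
--             return
--         head, rest = rest[k], rest[k + 1:]
-- ===== Notes on version B (the rewrite author's own statement) =====
-- stated objective: alternative
-- what changed: Replaces A's running accumulator list (append each line, flush on '$') by a two-level scan that finds the next '$' boundary index and yields a slice, carrying only the header and the remaining suffix.
import Mathlib
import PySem

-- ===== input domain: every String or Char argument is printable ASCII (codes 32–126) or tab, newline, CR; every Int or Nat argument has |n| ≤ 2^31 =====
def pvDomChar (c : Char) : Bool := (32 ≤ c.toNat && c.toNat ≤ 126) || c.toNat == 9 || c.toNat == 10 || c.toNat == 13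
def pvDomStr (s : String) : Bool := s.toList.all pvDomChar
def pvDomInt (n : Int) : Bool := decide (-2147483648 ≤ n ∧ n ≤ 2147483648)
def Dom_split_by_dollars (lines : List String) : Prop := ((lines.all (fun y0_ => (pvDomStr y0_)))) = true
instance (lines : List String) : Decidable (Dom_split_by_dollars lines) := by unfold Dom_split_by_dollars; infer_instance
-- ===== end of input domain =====

-- B replaces A's running accumulator (append each line, flush on '$') by a scan that finds the
-- next '$' boundary index and yields a slice; the generators' yielded values agree on all
-- non-empty inputs (both raise IndexError on [], excluded by Pre_).

-- ===== PORT A =====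
-- A's for-loop over lines[1:] with state (output yielded so far, acc); acc[0]/acc[1:] as headD/drop.
def splitA_loop (rest : List String) (out : List (String × List String)) (acc : List String) :
    List (String × List String) :=
  match rest with
  | [] => out ++ [(acc.headD "", acc.drop 1)]
  | line :: rs =>
    if PySem.Str.startswith line "$" then
      splitA_loop rs (out ++ [(acc.headD "", acc.drop 1)]) [line]
    else
      splitA_loop rs out (acc ++ [line])

def split_by_dollars (lines : List String) : List (String × List String) :=
  match lines with
  | [] => []   -- Python raises IndexError at lines[0]; excluded by Pre_
  | l0 :: rest => splitA_loop rest [] [l0]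

-- ===== PORT B =====
-- inner while loop: advance k while k < len(rest) and not rest[k].startswith("$")
-- (fuel = a structural bound on the remaining iterations; it only makes the loop total)
def findK (rest : List String) (fuel : Nat) (k : Nat) : Nat :=
  match fuel with
  | 0 => k
  | f + 1 =>
    if k < rest.length ∧ ¬ PySem.Str.startswith (rest.getD k "") "$" = true then
      findK rest f (k + 1)
    else k

-- outer while loop, state (head, rest); yields (head, rest[:k]) then continues on rest[k+1:]
def splitB_loop (fuel : Nat) (head : String) (rest : List String) : List (String × List String) :=
  match fuel with
  | 0 => []   -- never reached: each iteration strictly shrinks rest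
  | f + 1 =>
    (head, rest.take (findK rest (rest.length + 1) 0)) ::
      (if findK rest (rest.length + 1) 0 = rest.length then []
       else splitB_loop f (rest.getD (findK rest (rest.length + 1) 0) "")
              (rest.drop (findK rest (rest.length + 1) 0 + 1)))

def split_by_dollars_alt (lines : List String) : List (String × List String) :=
  match lines with
  | [] => []   -- lines[0] raises IndexError on first next(); excluded by Pre_
  | l0 :: rest => splitB_loop (rest.length + 1) l0 rest

-- ===== PRECONDITION & SPEC =====
-- Pre_ excludes only the empty list, on which Python A (and B) raise IndexError at lines[0].
def Pre_split_by_dollars (lines : List String) : Prop := lines ≠ []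
instance (lines : List String) : Decidable (Pre_split_by_dollars lines) := by
  unfold Pre_split_by_dollars; infer_instance
def pvWitness_split_by_dollars : List String := ["$ ls", "dir a", "14848 b.txt", "$ cd a"]

def Spec_split_by_dollars (lines : List String) (out : List (String × List String)) : Prop := out = split_by_dollars_alt lines
instance (lines : List String) (out : List (String × List String)) : Decidable (Spec_split_by_dollars lines out) := by unfold Spec_split_by_dollars; infer_instance

-- ===== CLAIM (what is proved, stated in full; the proofs are below) =====
def Claim_equal_split_by_dollars : Prop := ∀ (lines : List String), Dom_split_by_dollars lines → Pre_split_by_dollars lines → Spec_split_by_dollars lines (split_by_dollars lines)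

-- ===== LEMMAS AND PROOFS =====

-- canonical form both loops are reduced to
def chunksAux (l0 : String) (pre : List String) (rest : List String) :
    List (String × List String) :=
  match rest with
  | [] => [(l0, pre)]
  | x :: xs =>
    if PySem.Str.startswith x "$" then (l0, pre) :: chunksAux x [] xs
    else chunksAux l0 (pre ++ [x]) xs

theorem splitA_loop_eq (rest : List String) :
    ∀ (out : List (String × List String)) (l0 : String) (pre : List String),
      splitA_loop rest out (l0 :: pre) = out ++ chunksAux l0 pre rest := by
  induction rest with
  | nil => intro out l0 pre; simp [splitA_loop, chunksAux]
  | cons x xs ih =>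
    intro out l0 pre
    simp only [splitA_loop, chunksAux]
    by_cases hx : PySem.Str.startswith x "$" = true
    · rw [if_pos hx, if_pos hx, ih]
      simp
    · rw [if_neg hx, if_neg hx]
      have hacc : (l0 :: pre) ++ [x] = l0 :: (pre ++ [x]) := rfl
      rw [hacc, ih]

theorem chunksAux_char (rest : List String) :
    ∀ (l0 : String) (pre : List String),
      chunksAux l0 pre rest
        = (l0, pre ++ rest.takeWhile (fun s => !PySem.Str.startswith s "$")) ::
          (match rest.dropWhile (fun s => !PySem.Str.startswith s "$") with
           | [] => []
           | x :: xs => chunksAux x [] xs) := by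
  induction rest with
  | nil => intro l0 pre; simp [chunksAux]
  | cons x xs ih =>
    intro l0 pre
    by_cases hx : PySem.Chars.startswith x.toList ['$'] = true
    · simp [chunksAux, hx]
    · simp [chunksAux, hx, ih]

theorem findK_eq (rest : List String) (fuel : Nat) :
    ∀ (k : Nat), rest.length ≤ k + fuel →
      findK rest fuel k
        = k + ((rest.drop k).takeWhile (fun s => !PySem.Str.startswith s "$")).length := by
  induction fuel with
  | zero =>
    intro k hk
    have hd : rest.drop k = [] := List.drop_eq_nil_of_le hk
    simp [findK, hd]
  | succ f ih =>
    intro k hk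
    by_cases h : k < rest.length ∧ ¬ PySem.Str.startswith (rest.getD k "") "$" = true
    · have hget : rest.getD k "" = rest[k] := List.getD_eq_getElem rest "" h.1
      have hp : (fun s => !PySem.Str.startswith s "$") rest[k] = true := by
        have h2 := h.2
        rw [hget] at h2
        simpa using h2
      rw [findK, if_pos h, ih (k + 1) (by omega), List.drop_eq_getElem_cons h.1,
          List.takeWhile_cons_of_pos (p := fun s => !PySem.Str.startswith s "$")
            (l := List.drop (k + 1) rest) hp]
      simp only [List.length_cons]
      omega
    · rw [findK, if_neg h]
      rcases Nat.lt_or_ge k rest.length with hlt | hge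
      · have hget : rest.getD k "" = rest[k] := List.getD_eq_getElem rest "" hlt
        have hp : ¬ (fun s => !PySem.Str.startswith s "$") rest[k] = true := by
          by_contra hc
          refine h ⟨hlt, ?_⟩
          rw [hget]
          simpa using hc
        rw [List.drop_eq_getElem_cons hlt,
            List.takeWhile_cons_of_neg (p := fun s => !PySem.Str.startswith s "$")
              (l := List.drop (k + 1) rest) hp]
        simp
      · simp [List.drop_eq_nil_of_le hge]

theorem take_length_takeWhile {α : Type} (p : α → Bool) (l : List α) :
    l.take (l.takeWhile p).length = l.takeWhile p := by
  induction l with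
  | nil => simp
  | cons x xs ih =>
    by_cases hx : p x
    · simp [hx, ih]
    · simp [hx]

theorem dropWhile_eq_drop {α : Type} (p : α → Bool) (l : List α) :
    l.dropWhile p = l.drop (l.takeWhile p).length := by
  induction l with
  | nil => simp
  | cons x xs ih =>
    by_cases hx : p x
    · simp [hx, ih]
    · simp [hx]

theorem splitB_loop_eq (fuel : Nat) :
    ∀ (head : String) (rest : List String), rest.length < fuel →
      splitB_loop fuel head rest = chunksAux head [] rest := by
  induction fuel with
  | zero => intro head rest hf; omega
  | succ f ih =>
    intro head rest hf
    have hk : findK rest (rest.length + 1) 0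
        = (rest.takeWhile (fun s => !PySem.Str.startswith s "$")).length := by
      have h0 := findK_eq rest (rest.length + 1) 0 (by omega)
      simp only [List.drop_zero] at h0
      omega
    have hkle : (rest.takeWhile (fun s => !PySem.Str.startswith s "$")).length ≤ rest.length :=
      (List.takeWhile_sublist _).length_le
    rw [splitB_loop, chunksAux_char, hk, take_length_takeWhile, dropWhile_eq_drop]
    by_cases hend : (rest.takeWhile (fun s => !PySem.Str.startswith s "$")).length = rest.length
    · rw [if_pos hend, List.drop_eq_nil_of_le (Nat.le_of_eq hend.symm)]
      simp
    · have hlt : (rest.takeWhile (fun s => !PySem.Str.startswith s "$")).length < rest.length :=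
        Nat.lt_of_le_of_ne hkle hend
      rw [if_neg hend, List.drop_eq_getElem_cons hlt, List.getD_eq_getElem rest "" hlt,
          ih _ _ (by simp only [List.length_drop]; omega)]
      simp

-- ===== VERDICT (by name: the statement is the Claim_ definition above) =====
theorem split_by_dollars_spec : Claim_equal_split_by_dollars := by
  intro lines _ hpre
  unfold Spec_split_by_dollars
  match lines with
  | [] => exact absurd rfl hpre
  | l0 :: rest =>
    show splitA_loop rest [] [l0] = splitB_loop (rest.length + 1) l0 rest
    rw [splitB_loop_eq (rest.length + 1) l0 rest (by omega), splitA_loop_eq]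
    simp
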